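-- pv_equiv track=rewrite | github.com/yuansiang/cpy5python-1 | number bases/numbases.py | decToOct
-- ===== SOURCE A (Python) =====
-- import math
--
-- def decToOct(quotient):
-- 	ans=""
-- 	while quotient > 7:
-- 		rem = quotient % 8
-- 		quotient = math.floor(quotient / 8)
-- 		ans = str(rem) + ans
-- 	ans = str(quotient) + ans
-- 	return ans
-- ===== SOURCE B (Python) =====
-- import math
--
-- def decToOct(quotient):
--     # Recursive base-conversion: base case reproduces A's behaviour for
--     # quotient <= 7 (including negatives, where A's loop never runs).
--     if quotient <= 7:
--         return str(quotient)
--     return decToOct(math.floor(quotient / 8)) + str(quotient % 8)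
-- ===== Notes on version B (the rewrite author's own statement) =====
-- stated objective: simpler
-- what changed: Replaces the explicit while-loop with an accumulator string prepended digit by digit with the standard recursive base-conversion formulation (recurse on quotient//8, append the last digit).
import Mathlib
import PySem

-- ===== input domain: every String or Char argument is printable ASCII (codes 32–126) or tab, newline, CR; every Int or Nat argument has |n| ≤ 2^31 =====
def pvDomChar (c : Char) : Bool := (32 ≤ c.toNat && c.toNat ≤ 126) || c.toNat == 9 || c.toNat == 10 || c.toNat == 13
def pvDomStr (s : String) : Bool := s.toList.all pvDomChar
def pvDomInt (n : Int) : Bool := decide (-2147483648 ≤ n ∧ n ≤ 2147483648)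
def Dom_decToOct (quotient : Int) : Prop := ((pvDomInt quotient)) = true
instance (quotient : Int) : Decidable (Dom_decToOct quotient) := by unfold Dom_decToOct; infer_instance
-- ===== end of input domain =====

-- B replaces A's while-loop that prepends digits to an accumulator string with the
-- standard recursive base-conversion formulation (objective: simpler).


-- ===== PORT A =====
-- the while loop of A; math.floor(quotient / 8) is exact floor division (= floordiv)
-- for |quotient| ≤ 2^31, far below float precision loss.
def decToOctLoopA (quotient : Int) (ans : String) : String :=
  if _h : quotient > 7 then
    decToOctLoopA (PySem.Int.floordiv quotient 8)
      (PySem.Int.toStr (PySem.Int.mod quotient 8) ++ ans)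
  else
    PySem.Int.toStr quotient ++ ans
termination_by quotient.toNat
decreasing_by
  rw [PySem.Int.floordiv_eq_ediv_of_pos (by norm_num)]; omega

def decToOct (quotient : Int) : String :=
  decToOctLoopA quotient ""

-- ===== PORT B =====
def decToOct_alt (quotient : Int) : String :=
  if _h : quotient ≤ 7 then
    PySem.Int.toStr quotient
  else
    decToOct_alt (PySem.Int.floordiv quotient 8) ++ PySem.Int.toStr (PySem.Int.mod quotient 8)
termination_by quotient.toNat
decreasing_by
  rw [PySem.Int.floordiv_eq_ediv_of_pos (by norm_num)]; omega

-- ===== PRECONDITION & SPEC =====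
def Spec_decToOct (quotient : Int) (out : String) : Prop := out = decToOct_alt quotient
instance (quotient : Int) (out : String) : Decidable (Spec_decToOct quotient out) := by unfold Spec_decToOct; infer_instance

-- ===== CLAIM (what is proved, stated in full; the proofs are below) =====
def Claim_equal_decToOct : Prop := ∀ (quotient : Int), Dom_decToOct quotient → Spec_decToOct quotient (decToOct quotient)

-- ===== LEMMAS AND PROOFS =====
theorem decToOctLoopA_eq_alt (quotient : Int) (ans : String) :
    decToOctLoopA quotient ans = decToOct_alt quotient ++ ans := by
  induction quotient, ans using decToOctLoopA.induct with
  | case1 q ans h ih =>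
    rw [decToOctLoopA, dif_pos h, ih]
    conv_rhs => rw [decToOct_alt]
    rw [dif_neg (show ¬ q ≤ 7 by omega)]
    simp [String.append_assoc]
  | case2 q ans h =>
    rw [decToOctLoopA, dif_neg h]
    conv_rhs => rw [decToOct_alt]
    rw [dif_pos (show q ≤ 7 by omega)]

-- ===== VERDICT (by name: the statement is the Claim_ definition above) =====
theorem decToOct_spec : Claim_equal_decToOct := by
  intro q _
  unfold Spec_decToOct decToOct
  rw [decToOctLoopA_eq_alt]
  simp
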